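-- pv_equiv track=rewrite | github.com/xmaslo/log-signing-mpc | evaluation/utils/create_payload.py | get_payloads_layout
-- ===== SOURCE A (Python) =====
-- def get_payloads_layout(server_ports, server_ids, server_urls):
--     """
--     Given, get_payloads_layout(["8001","8002","8003"], [1,2,3], ["url1","url2","url3"]),
--     it returns:
--         {
--             "8001": [(2, "url2"), (3, "url3")],
--             "8002": [(1, "url1), (3, "url3)],
--             "8003": [(1, "url1"), (2, "url2")]
--         }
--     """
--     payloads = {}
--
--     assert len(server_ports) == len(server_ids)
--     assert len(server_ids) == len(server_urls)
--     n = len(server_ports)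
--
--     for i in range(n):
--         other_ids = []
--         for j in range(n):
--             if i != j:
--                 other_ids.append((server_ids[j], server_urls[j]))
--         payloads[server_ports[i]] = other_ids
--
--     return payloads
-- ===== SOURCE B (Python) =====
-- def get_payloads_layout(server_ports, server_ids, server_urls):
--     assert len(server_ports) == len(server_ids)
--     assert len(server_ids) == len(server_urls)
--     payloads = {}
--     before = []
--     after = list(zip(server_ids, server_urls))
--     for port in server_ports:
--         pair, after = after[0], after[1:]
--         payloads[port] = before + after
--         before = before + [pair]
--     return payloads
-- ===== Notes on version B (the rewrite author's own statement) =====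
-- stated objective: alternative
-- what changed: Replaces A's nested index loops (for each i, rescan all j with an i!=j test and per-element appends) by a single prefix/suffix sweep: one pass over the ports that rolls a 'before' prefix and 'after' suffix of the zipped (id,url) pairs and assigns before+after at each step, with no indices and no inner scan.
import Mathlib
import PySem

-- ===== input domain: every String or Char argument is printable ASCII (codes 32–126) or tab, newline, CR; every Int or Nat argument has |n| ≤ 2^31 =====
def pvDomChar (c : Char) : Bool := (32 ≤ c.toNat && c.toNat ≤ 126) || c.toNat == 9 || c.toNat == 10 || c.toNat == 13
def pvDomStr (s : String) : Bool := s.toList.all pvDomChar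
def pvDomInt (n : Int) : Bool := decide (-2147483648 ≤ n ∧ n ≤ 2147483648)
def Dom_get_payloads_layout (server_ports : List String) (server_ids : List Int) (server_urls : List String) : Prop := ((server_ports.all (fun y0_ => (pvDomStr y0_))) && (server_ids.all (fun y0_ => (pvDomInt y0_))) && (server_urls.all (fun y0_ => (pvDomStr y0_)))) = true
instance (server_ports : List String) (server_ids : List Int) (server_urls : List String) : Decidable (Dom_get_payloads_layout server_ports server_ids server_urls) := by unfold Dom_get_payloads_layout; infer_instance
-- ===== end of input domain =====

-- B replaces A's nested index loops by a single prefix/suffix sweep over the ports, rolling a 'before' prefix and 'after' suffix of the zipped pairs (objective: alternative structure, same cost).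

-- ===== PORT A =====
def get_payloads_layout (server_ports : List String) (server_ids : List Int) (server_urls : List String) : List (String × List (Int × String)) :=
  -- the two asserts: the guard only makes the port total; Pre_ excludes the failing inputs
  if server_ports.length = server_ids.length ∧ server_ids.length = server_urls.length then
    let n : Nat := server_ports.length
    ((PySem.List.pyRange 0 (n : Int) 1).foldl
      (fun (payloads : PySem.Dict String (List (Int × String))) i =>
        let other_ids := (PySem.List.pyRange 0 (n : Int) 1).foldl
          (fun acc j =>
            if i ≠ j then acc ++ [(PySem.List.pyGetD server_ids j 0, PySem.List.pyGetD server_urls j "")]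
            else acc) []
        payloads.insert (PySem.List.pyGetD server_ports i "") other_ids)
      PySem.Dict.empty).items
  else []

-- ===== PORT B =====
-- one step of Source B's loop body; 'after[0]' is always in range under the asserts, so the [] branch is unreachable
def pvSweepStep (st : PySem.Dict String (List (Int × String)) × List (Int × String) × List (Int × String)) (port : String) :
    PySem.Dict String (List (Int × String)) × List (Int × String) × List (Int × String) :=
  match st.2.2 with
  | pair :: after' => (st.1.insert port (st.2.1 ++ after'), st.2.1 ++ [pair], after')
  | [] => st

def get_payloads_layout_alt (server_ports : List String) (server_ids : List Int) (server_urls : List String) : List (String × List (Int × String)) :=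
  if server_ports.length = server_ids.length ∧ server_ids.length = server_urls.length then
    (server_ports.foldl pvSweepStep (PySem.Dict.empty, [], server_ids.zip server_urls)).1.items
  else []

-- ===== PRECONDITION & SPEC =====
-- Pre_: A's two asserts — AssertionError when the three lists do not all have the same length
def Pre_get_payloads_layout (server_ports : List String) (server_ids : List Int) (server_urls : List String) : Prop :=
  server_ports.length = server_ids.length ∧ server_ids.length = server_urls.length
instance (server_ports : List String) (server_ids : List Int) (server_urls : List String) : Decidable (Pre_get_payloads_layout server_ports server_ids server_urls) := by unfold Pre_get_payloads_layout; infer_instance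
def pvWitness_get_payloads_layout : List String × List Int × List String :=
  (["8001", "8002", "8003"], [1, 2, 3], ["url1", "url2", "url3"])
def Spec_get_payloads_layout (server_ports : List String) (server_ids : List Int) (server_urls : List String) (out : List (String × List (Int × String))) : Prop := out = get_payloads_layout_alt server_ports server_ids server_urls
instance (server_ports : List String) (server_ids : List Int) (server_urls : List String) (out : List (String × List (Int × String))) : Decidable (Spec_get_payloads_layout server_ports server_ids server_urls out) := by unfold Spec_get_payloads_layout; infer_instance

-- ===== CLAIM (what is proved, stated in full; the proofs are below) =====
def Claim_equal_get_payloads_layout : Prop := ∀ (server_ports : List String) (server_ids : List Int) (server_urls : List String), Dom_get_payloads_layout server_ports server_ids server_urls → Pre_get_payloads_layout server_ports server_ids server_urls → Spec_get_payloads_layout server_ports server_ids server_urls (get_payloads_layout server_ports server_ids server_urls)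

-- ===== LEMMAS AND PROOFS =====

-- mapping paired getD over range rebuilds the zip
theorem pv_zip_eq_map_range {α β : Type} (da : α) (db : β) :
    ∀ (xs : List α) (ys : List β), xs.length = ys.length →
      (List.range xs.length).map (fun j => (xs.getD j da, ys.getD j db)) = xs.zip ys := by
  intro xs
  induction xs with
  | nil => intro ys _; simp
  | cons x xs ih =>
    intro ys h
    cases ys with
    | nil => simp at h
    | cons y ys =>
      simp only [List.length_cons, List.range_succ_eq_map, List.map_cons, List.map_map]
      simp only [List.getD_cons_zero, List.zip_cons_cons]
      congr 1
      have := ih ys (by simpa using h)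
      simpa [Function.comp] using this

-- filtering out index i and reading the pairs splices the zip (A's inner loop = prefix ++ suffix)
theorem pv_splice {α β : Type} (da : α) (db : β) :
    ∀ (xs : List α) (ys : List β) (i : Nat), xs.length = ys.length → i < xs.length →
      ((List.range xs.length).filter (fun j => !(i == j))).map (fun j => (xs.getD j da, ys.getD j db))
        = (xs.zip ys).take i ++ (xs.zip ys).drop (i + 1) := by
  intro xs
  induction xs with
  | nil => intro ys i _ hi; simp at hi
  | cons x xs ih =>
    intro ys i h hi
    cases ys with
    | nil => simp at h
    | cons y ys =>
      have hlen : xs.length = ys.length := by simpa using h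
      simp only [List.length_cons, List.range_succ_eq_map, List.filter_cons, List.filter_map]
      cases i with
      | zero =>
        have hkeep : (List.range xs.length).filter ((fun j => !(0 == j)) ∘ (fun n => n + 1)) = List.range xs.length := by
          apply List.filter_eq_self.mpr; intro a _; simp
        simp only [hkeep]
        rw [if_neg (by simp)]
        simp only [List.map_map, Function.comp_def, List.getD_cons_succ, List.zip_cons_cons,
          List.take_zero, List.drop_succ_cons, List.drop_zero, List.nil_append]
        exact pv_zip_eq_map_range da db xs ys hlen
      | succ i =>
        have hi' : i < xs.length := by simpa using hi
        have hfil : ((fun j => !(i + 1 == j)) ∘ (fun n : Nat => n + 1)) = (fun j => !(i == j)) := by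
          funext j; simp
        simp only [hfil]
        rw [if_pos (by simp)]
        simp only [List.map_cons, List.getD_cons_zero, List.map_map, Function.comp_def,
          List.getD_cons_succ]
        rw [ih ys i hlen hi']
        simp [List.zip_cons_cons, List.take_succ_cons, List.drop_succ_cons]

-- the common normal form: one insertion per index, value = before ++ take i ++ drop (i+1)
def pvNorm (ports : List String) (pairs before : List (Int × String))
    (d : PySem.Dict String (List (Int × String))) : PySem.Dict String (List (Int × String)) :=
  (List.range ports.length).foldl
    (fun acc i => acc.insert (ports.getD i "") (before ++ pairs.take i ++ pairs.drop (i + 1))) d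

-- B's sweep computes the normal form
theorem pv_sweep_eq_norm :
    ∀ (ports : List String) (pairs before : List (Int × String)) (d : PySem.Dict String (List (Int × String))),
      ports.length = pairs.length →
      (ports.foldl pvSweepStep (d, before, pairs)).1 = pvNorm ports pairs before d := by
  intro ports
  induction ports with
  | nil => intro pairs before d _; simp [pvNorm]
  | cons p ps ih =>
    intro pairs before d h
    cases pairs with
    | nil => simp at h
    | cons q qs =>
      have hlen : ps.length = qs.length := by simpa using h
      rw [List.foldl_cons]
      have hstep : pvSweepStep (d, before, q :: qs) p = (d.insert p (before ++ qs), before ++ [q], qs) := by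
        simp [pvSweepStep]
      rw [hstep, ih qs (before ++ [q]) _ hlen]
      unfold pvNorm
      simp only [List.length_cons, List.range_succ_eq_map, List.foldl_cons, List.foldl_map,
        List.getD_cons_zero, List.take_zero, List.drop_succ_cons, List.drop_zero, List.append_nil]
      apply PySem.List.foldl_congr_mem
      intro acc i _
      simp [List.take_succ_cons, List.append_assoc]

-- ===== VERDICT (by name: the statement is the Claim_ definition above) =====
theorem get_payloads_layout_spec : Claim_equal_get_payloads_layout := by
  intro ports ids urls _ hpre
  obtain ⟨h1, h2⟩ := hpre
  unfold Spec_get_payloads_layout get_payloads_layout get_payloads_layout_alt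
  rw [if_pos ⟨h1, h2⟩, if_pos ⟨h1, h2⟩]
  dsimp only
  congr 1
  rw [pv_sweep_eq_norm ports (ids.zip urls) [] PySem.Dict.empty
    (by rw [List.length_zip, ← h1, ← h2, ← h1, Nat.min_self])]
  unfold pvNorm
  rw [PySem.List.pyRange_zero_natCast, List.foldl_map]
  apply PySem.List.foldl_congr_mem
  intro acc k hk
  have hklt : k < ports.length := List.mem_range.mp hk
  rw [PySem.List.pyGetD_natCast]
  congr 1
  have hfun : ∀ (acc : List (Int × String)) (x : Int), x ∈ (List.range ports.length).map (fun m : Nat => (m : Int)) →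
      (if (k : Int) ≠ x then acc ++ [(PySem.List.pyGetD ids x 0, PySem.List.pyGetD urls x "")] else acc)
      = (if ((k : Int) != x) then acc ++ [(PySem.List.pyGetD ids x 0, PySem.List.pyGetD urls x "")] else acc) := by
    intro acc x _; by_cases hx : (k : Int) = x <;> simp [hx]
  refine (PySem.List.foldl_congr_mem _ _ _ _ hfun).trans ?_
  rw [PySem.List.foldl_append_if, List.nil_append, List.filter_map, List.map_map]
  have hcond : ((fun j => (k : Int) != j) ∘ fun n : Nat => (n : Int)) = (fun j : Nat => !(k == j)) := by
    funext j
    by_cases h : k = j <;> simp [bne, Nat.cast_inj, h]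
  rw [hcond]
  have hbody : ((fun j => (PySem.List.pyGetD ids j 0, PySem.List.pyGetD urls j "")) ∘ fun n : Nat => (n : Int))
      = (fun j : Nat => (ids.getD j 0, urls.getD j "")) := by
    funext j; simp [Function.comp, PySem.List.pyGetD_natCast]
  rw [hbody]
  have hklen : k < ids.length := h1 ▸ hklt
  have := pv_splice 0 "" ids urls k h2 hklen
  rw [← h1] at this
  rw [this, List.nil_append]
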